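-- pv_equiv track=rewrite | github.com/Xhourstoprogram/CompBioass1-Reynard | num2.py | amino_acid_to_mrna
-- ===== SOURCE A (Python) =====
-- codon_to_amino_acid = {
--     "UUU": "F", "UUC": "F", "UUA": "L", "UUG": "L",
--     "CUU": "L", "CUC": "L", "CUA": "L", "CUG": "L",
--     "AUU": "I", "AUC": "I", "AUA": "I", "AUG": "M",
--     "GUU": "V", "GUC": "V", "GUA": "V", "GUG": "V",
--     "UCU": "S", "UCC": "S", "UCA": "S", "UCG": "S",
--     "CCU": "P", "CCC": "P", "CCA": "P", "CCG": "P",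
--     "ACU": "T", "ACC": "T", "ACA": "T", "ACG": "T",
--     "GCU": "A", "GCC": "A", "GCA": "A", "GCG": "A",
--     "UAU": "Y", "UAC": "Y", "UAA": "STOP", "UAG": "STOP",
--     "CAU": "H", "CAC": "H", "CAA": "Q", "CAG": "Q",
--     "AAU": "N", "AAC": "N", "AAA": "K", "AAG": "K",
--     "GAU": "D", "GAC": "D", "GAA": "E", "GAG": "E",
--     "UGU": "C", "UGC": "C", "UGA": "STOP", "UGG": "W",
--     "CGU": "R", "CGC": "R", "CGA": "R", "CGG": "R",
--     "AGU": "S", "AGC": "S", "AGA": "R", "AGG": "R",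
--     "GGU": "G", "GGC": "G", "GGA": "G", "GGG": "G",
-- }
--
-- def amino_acid_to_mrna(amino_acid):
--     mrna = ""
--     for aa in amino_acid:
--         for codon, aa_code in codon_to_amino_acid.items():
--             if aa == aa_code:
--                 mrna += codon
--                 break
--     return mrna
-- ===== SOURCE B (Python) =====
-- # Literal reverse table: for each amino-acid letter, the FIRST codon that maps to
-- # it in codon_to_amino_acid's insertion order (the codon A's inner scan finds).
-- _FIRST_CODON = {
--     "F": "UUU", "L": "UUA", "I": "AUU", "M": "AUG", "V": "GUU",
--     "S": "UCU", "P": "CCU", "T": "ACU", "A": "GCU", "Y": "UAU",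
--     "H": "CAU", "Q": "CAA", "N": "AAU", "K": "AAA", "D": "GAU",
--     "E": "GAA", "C": "UGU", "W": "UGG", "R": "CGU", "G": "GGU",
-- }
--
--
-- def amino_acid_to_mrna(amino_acid):
--     return "".join(_FIRST_CODON.get(ch, "") for ch in amino_acid)
-- ===== Notes on version B (the rewrite author's own statement) =====
-- stated objective: faster
-- what changed: Replaces the nested 64-entry scan per input character by a literal first-codon reverse table and a single join over constant-time lookups with empty default.
import Mathlib
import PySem

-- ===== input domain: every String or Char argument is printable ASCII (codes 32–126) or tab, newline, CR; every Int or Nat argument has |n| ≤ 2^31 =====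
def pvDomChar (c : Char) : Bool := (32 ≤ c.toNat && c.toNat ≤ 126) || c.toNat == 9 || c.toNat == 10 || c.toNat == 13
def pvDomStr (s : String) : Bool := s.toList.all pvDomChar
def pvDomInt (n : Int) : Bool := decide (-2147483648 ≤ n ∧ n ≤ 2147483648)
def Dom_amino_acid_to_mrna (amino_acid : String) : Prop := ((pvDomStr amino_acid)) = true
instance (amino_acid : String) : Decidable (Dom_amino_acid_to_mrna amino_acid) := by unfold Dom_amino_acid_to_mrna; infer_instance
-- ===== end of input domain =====

set_option maxRecDepth 8000


-- B drops A's per-character scan of the 64-entry codon table in favour of a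
-- literal 20-entry first-codon reverse table queried once per character (faster
-- by a constant factor). Strings are handled at the PySem.Chars (List Char)
-- level, exact for these ASCII literals.

-- ===== PORT A =====
-- the module-level codon_to_amino_acid table, in source order
def pvTable : List (List Char × List Char) :=
  [(['U', 'U', 'U'], ['F']), (['U', 'U', 'C'], ['F']),
   (['U', 'U', 'A'], ['L']), (['U', 'U', 'G'], ['L']),
   (['C', 'U', 'U'], ['L']), (['C', 'U', 'C'], ['L']),
   (['C', 'U', 'A'], ['L']), (['C', 'U', 'G'], ['L']),
   (['A', 'U', 'U'], ['I']), (['A', 'U', 'C'], ['I']),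
   (['A', 'U', 'A'], ['I']), (['A', 'U', 'G'], ['M']),
   (['G', 'U', 'U'], ['V']), (['G', 'U', 'C'], ['V']),
   (['G', 'U', 'A'], ['V']), (['G', 'U', 'G'], ['V']),
   (['U', 'C', 'U'], ['S']), (['U', 'C', 'C'], ['S']),
   (['U', 'C', 'A'], ['S']), (['U', 'C', 'G'], ['S']),
   (['C', 'C', 'U'], ['P']), (['C', 'C', 'C'], ['P']),
   (['C', 'C', 'A'], ['P']), (['C', 'C', 'G'], ['P']),
   (['A', 'C', 'U'], ['T']), (['A', 'C', 'C'], ['T']),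
   (['A', 'C', 'A'], ['T']), (['A', 'C', 'G'], ['T']),
   (['G', 'C', 'U'], ['A']), (['G', 'C', 'C'], ['A']),
   (['G', 'C', 'A'], ['A']), (['G', 'C', 'G'], ['A']),
   (['U', 'A', 'U'], ['Y']), (['U', 'A', 'C'], ['Y']),
   (['U', 'A', 'A'], ['S', 'T', 'O', 'P']), (['U', 'A', 'G'], ['S', 'T', 'O', 'P']),
   (['C', 'A', 'U'], ['H']), (['C', 'A', 'C'], ['H']),
   (['C', 'A', 'A'], ['Q']), (['C', 'A', 'G'], ['Q']),
   (['A', 'A', 'U'], ['N']), (['A', 'A', 'C'], ['N']),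
   (['A', 'A', 'A'], ['K']), (['A', 'A', 'G'], ['K']),
   (['G', 'A', 'U'], ['D']), (['G', 'A', 'C'], ['D']),
   (['G', 'A', 'A'], ['E']), (['G', 'A', 'G'], ['E']),
   (['U', 'G', 'U'], ['C']), (['U', 'G', 'C'], ['C']),
   (['U', 'G', 'A'], ['S', 'T', 'O', 'P']), (['U', 'G', 'G'], ['W']),
   (['C', 'G', 'U'], ['R']), (['C', 'G', 'C'], ['R']),
   (['C', 'G', 'A'], ['R']), (['C', 'G', 'G'], ['R']),
   (['A', 'G', 'U'], ['S']), (['A', 'G', 'C'], ['S']),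
   (['A', 'G', 'A'], ['R']), (['A', 'G', 'G'], ['R']),
   (['G', 'G', 'U'], ['G']), (['G', 'G', 'C'], ['G']),
   (['G', 'G', 'A'], ['G']), (['G', 'G', 'G'], ['G'])]

-- the inner 'for codon, aa_code in … : if aa == aa_code: mrna += codon; break'
def pvInnerA (aa : Char) (t : List (List Char × List Char)) (mrna : List Char) : List Char :=
  match t with
  | [] => mrna
  | (codon, code) :: rest =>
      if [aa] == code then mrna ++ codon else pvInnerA aa rest mrna

def amino_acid_to_mrna (amino_acid : String) : String :=
  String.ofList (amino_acid.toList.foldl (fun mrna aa => pvInnerA aa pvTable mrna) [])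

-- ===== PORT B =====
-- the literal reverse table _FIRST_CODON from Source B (a dict literal, distinct keys)
def pvFirstCodon : PySem.Dict (List Char) (List Char) :=
  PySem.Dict.mk
    [(['F'], ['U', 'U', 'U']), (['L'], ['U', 'U', 'A']),
     (['I'], ['A', 'U', 'U']), (['M'], ['A', 'U', 'G']),
     (['V'], ['G', 'U', 'U']), (['S'], ['U', 'C', 'U']),
     (['P'], ['C', 'C', 'U']), (['T'], ['A', 'C', 'U']),
     (['A'], ['G', 'C', 'U']), (['Y'], ['U', 'A', 'U']),
     (['H'], ['C', 'A', 'U']), (['Q'], ['C', 'A', 'A']),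
     (['N'], ['A', 'A', 'U']), (['K'], ['A', 'A', 'A']),
     (['D'], ['G', 'A', 'U']), (['E'], ['G', 'A', 'A']),
     (['C'], ['U', 'G', 'U']), (['W'], ['U', 'G', 'G']),
     (['R'], ['C', 'G', 'U']), (['G'], ['G', 'G', 'U'])]

-- '"".join(_FIRST_CODON.get(ch, "") for ch in amino_acid)'
def amino_acid_to_mrna_alt (amino_acid : String) : String :=
  String.ofList
    (PySem.Chars.join [] (amino_acid.toList.map (fun ch => pvFirstCodon.getD [ch] [])))

-- ===== PRECONDITION & SPEC =====
def Spec_amino_acid_to_mrna (amino_acid : String) (out : String) : Prop := out = amino_acid_to_mrna_alt amino_acid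
instance (amino_acid : String) (out : String) : Decidable (Spec_amino_acid_to_mrna amino_acid out) := by unfold Spec_amino_acid_to_mrna; infer_instance

-- ===== CLAIM (what is proved, stated in full; the proofs are below) =====
def Claim_equal_amino_acid_to_mrna : Prop := ∀ (amino_acid : String), Dom_amino_acid_to_mrna amino_acid → Spec_amino_acid_to_mrna amino_acid (amino_acid_to_mrna amino_acid)

-- ===== LEMMAS AND PROOFS =====

-- the amino-acid letters that occur as single-letter values in the table
def pvL : List Char := ['F', 'L', 'I', 'M', 'V', 'S', 'P', 'T', 'A', 'Y', 'H', 'Q', 'N', 'K', 'D', 'E', 'C', 'W', 'R', 'G']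

-- every value in the codon table is "STOP" or a single amino-acid letter
theorem pv_tableVals : ∀ p ∈ pvTable, p.2 = ['S', 'T', 'O', 'P'] ∨ ∃ c ∈ pvL, p.2 = [c] := by
  intro p hp
  simp only [pvTable, List.mem_cons, List.not_mem_nil, or_false] at hp
  rcases hp with rfl|rfl|rfl|rfl|rfl|rfl|rfl|rfl|rfl|rfl|rfl|rfl|rfl|rfl|rfl|rfl|rfl|rfl|rfl|rfl|rfl|rfl|rfl|rfl|rfl|rfl|rfl|rfl|rfl|rfl|rfl|rfl|rfl|rfl|rfl|rfl|rfl|rfl|rfl|rfl|rfl|rfl|rfl|rfl|rfl|rfl|rfl|rfl|rfl|rfl|rfl|rfl|rfl|rfl|rfl|rfl|rfl|rfl|rfl|rfl|rfl|rfl|rfl|rfl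
  · exact Or.inr ⟨'F', by simp [pvL], rfl⟩
  · exact Or.inr ⟨'F', by simp [pvL], rfl⟩
  · exact Or.inr ⟨'L', by simp [pvL], rfl⟩
  · exact Or.inr ⟨'L', by simp [pvL], rfl⟩
  · exact Or.inr ⟨'L', by simp [pvL], rfl⟩
  · exact Or.inr ⟨'L', by simp [pvL], rfl⟩
  · exact Or.inr ⟨'L', by simp [pvL], rfl⟩
  · exact Or.inr ⟨'L', by simp [pvL], rfl⟩
  · exact Or.inr ⟨'I', by simp [pvL], rfl⟩
  · exact Or.inr ⟨'I', by simp [pvL], rfl⟩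
  · exact Or.inr ⟨'I', by simp [pvL], rfl⟩
  · exact Or.inr ⟨'M', by simp [pvL], rfl⟩
  · exact Or.inr ⟨'V', by simp [pvL], rfl⟩
  · exact Or.inr ⟨'V', by simp [pvL], rfl⟩
  · exact Or.inr ⟨'V', by simp [pvL], rfl⟩
  · exact Or.inr ⟨'V', by simp [pvL], rfl⟩
  · exact Or.inr ⟨'S', by simp [pvL], rfl⟩
  · exact Or.inr ⟨'S', by simp [pvL], rfl⟩
  · exact Or.inr ⟨'S', by simp [pvL], rfl⟩
  · exact Or.inr ⟨'S', by simp [pvL], rfl⟩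
  · exact Or.inr ⟨'P', by simp [pvL], rfl⟩
  · exact Or.inr ⟨'P', by simp [pvL], rfl⟩
  · exact Or.inr ⟨'P', by simp [pvL], rfl⟩
  · exact Or.inr ⟨'P', by simp [pvL], rfl⟩
  · exact Or.inr ⟨'T', by simp [pvL], rfl⟩
  · exact Or.inr ⟨'T', by simp [pvL], rfl⟩
  · exact Or.inr ⟨'T', by simp [pvL], rfl⟩
  · exact Or.inr ⟨'T', by simp [pvL], rfl⟩
  · exact Or.inr ⟨'A', by simp [pvL], rfl⟩
  · exact Or.inr ⟨'A', by simp [pvL], rfl⟩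
  · exact Or.inr ⟨'A', by simp [pvL], rfl⟩
  · exact Or.inr ⟨'A', by simp [pvL], rfl⟩
  · exact Or.inr ⟨'Y', by simp [pvL], rfl⟩
  · exact Or.inr ⟨'Y', by simp [pvL], rfl⟩
  · exact Or.inl rfl
  · exact Or.inl rfl
  · exact Or.inr ⟨'H', by simp [pvL], rfl⟩
  · exact Or.inr ⟨'H', by simp [pvL], rfl⟩
  · exact Or.inr ⟨'Q', by simp [pvL], rfl⟩
  · exact Or.inr ⟨'Q', by simp [pvL], rfl⟩
  · exact Or.inr ⟨'N', by simp [pvL], rfl⟩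
  · exact Or.inr ⟨'N', by simp [pvL], rfl⟩
  · exact Or.inr ⟨'K', by simp [pvL], rfl⟩
  · exact Or.inr ⟨'K', by simp [pvL], rfl⟩
  · exact Or.inr ⟨'D', by simp [pvL], rfl⟩
  · exact Or.inr ⟨'D', by simp [pvL], rfl⟩
  · exact Or.inr ⟨'E', by simp [pvL], rfl⟩
  · exact Or.inr ⟨'E', by simp [pvL], rfl⟩
  · exact Or.inr ⟨'C', by simp [pvL], rfl⟩
  · exact Or.inr ⟨'C', by simp [pvL], rfl⟩
  · exact Or.inl rfl
  · exact Or.inr ⟨'W', by simp [pvL], rfl⟩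
  · exact Or.inr ⟨'R', by simp [pvL], rfl⟩
  · exact Or.inr ⟨'R', by simp [pvL], rfl⟩
  · exact Or.inr ⟨'R', by simp [pvL], rfl⟩
  · exact Or.inr ⟨'R', by simp [pvL], rfl⟩
  · exact Or.inr ⟨'S', by simp [pvL], rfl⟩
  · exact Or.inr ⟨'S', by simp [pvL], rfl⟩
  · exact Or.inr ⟨'R', by simp [pvL], rfl⟩
  · exact Or.inr ⟨'R', by simp [pvL], rfl⟩
  · exact Or.inr ⟨'G', by simp [pvL], rfl⟩
  · exact Or.inr ⟨'G', by simp [pvL], rfl⟩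
  · exact Or.inr ⟨'G', by simp [pvL], rfl⟩
  · exact Or.inr ⟨'G', by simp [pvL], rfl⟩

-- A's inner scan finds no match when aa is not an amino-acid letter
theorem pv_nomatchA (aa : Char) (h : aa ∉ pvL) (t : List (List Char × List Char))
    (ht : ∀ p ∈ t, p.2 = ['S', 'T', 'O', 'P'] ∨ ∃ c ∈ pvL, p.2 = [c]) (acc : List Char) :
    pvInnerA aa t acc = acc := by
  induction t with
  | nil => rfl
  | cons p rest ih =>
    obtain ⟨codon, code⟩ := p
    have hcode := ht (codon, code) (List.mem_cons_self)
    have hne : ¬ ([aa] == code) = true := by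
      intro hb
      have he : [aa] = code := eq_of_beq hb
      rcases hcode with hs | ⟨c, hc, hcs⟩
      · have hs : code = ['S', 'T', 'O', 'P'] := hs
        rw [hs] at he; simp at he
      · have hcs : code = [c] := hcs
        rw [hcs] at he
        simp only [List.cons.injEq, and_true] at he
        exact h (he ▸ hc)
    simp only [pvInnerA, hne]
    exact ih (fun p hp => ht p (List.mem_cons_of_mem _ hp))

-- B's reverse lookup defaults to [] when aa is not an amino-acid letter
theorem pv_nomatchB (aa : Char) (h : aa ∉ pvL) :
    pvFirstCodon.getD [aa] [] = [] := by
  have hs : ∀ c ∈ pvL, ¬ (([c] : List Char) == [aa]) = true := by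
    intro c hc hb
    have he : c = aa := by simpa using eq_of_beq hb
    exact h (he ▸ hc)
  simp only [pvFirstCodon, PySem.Dict.getD_eq_get?_getD, PySem.Dict.get?_mk_cons]
  rw [if_neg (hs 'F' (by simp [pvL]))]
  rw [if_neg (hs 'L' (by simp [pvL]))]
  rw [if_neg (hs 'I' (by simp [pvL]))]
  rw [if_neg (hs 'M' (by simp [pvL]))]
  rw [if_neg (hs 'V' (by simp [pvL]))]
  rw [if_neg (hs 'S' (by simp [pvL]))]
  rw [if_neg (hs 'P' (by simp [pvL]))]
  rw [if_neg (hs 'T' (by simp [pvL]))]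
  rw [if_neg (hs 'A' (by simp [pvL]))]
  rw [if_neg (hs 'Y' (by simp [pvL]))]
  rw [if_neg (hs 'H' (by simp [pvL]))]
  rw [if_neg (hs 'Q' (by simp [pvL]))]
  rw [if_neg (hs 'N' (by simp [pvL]))]
  rw [if_neg (hs 'K' (by simp [pvL]))]
  rw [if_neg (hs 'D' (by simp [pvL]))]
  rw [if_neg (hs 'E' (by simp [pvL]))]
  rw [if_neg (hs 'C' (by simp [pvL]))]
  rw [if_neg (hs 'W' (by simp [pvL]))]
  rw [if_neg (hs 'R' (by simp [pvL]))]
  rw [if_neg (hs 'G' (by simp [pvL]))]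
  rfl

-- per-character agreement: A's inner scan appends exactly B's lookup
theorem pv_char (aa : Char) (acc : List Char) :
    pvInnerA aa pvTable acc = acc ++ pvFirstCodon.getD [aa] [] := by
  by_cases h : aa ∈ pvL
  · fin_cases h <;> rfl
  · rw [pv_nomatchA aa h pvTable pv_tableVals acc, pv_nomatchB aa h]
    simp

-- '"".join' peels one piece off the front
theorem pv_join_cons (s : List Char) (rest : List (List Char)) :
    PySem.Chars.join [] (s :: rest) = s ++ PySem.Chars.join [] rest := by
  cases rest with
  | nil => simp [PySem.Chars.join_singleton, PySem.Chars.join_nil]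
  | cons t r => rw [PySem.Chars.join_cons_cons]; simp

-- A's fold over the input equals acc ++ B's join
theorem pv_fold_eq (l : List Char) (acc : List Char) :
    l.foldl (fun mrna aa => pvInnerA aa pvTable mrna) acc =
      acc ++ PySem.Chars.join [] (l.map (fun ch => pvFirstCodon.getD [ch] [])) := by
  induction l generalizing acc with
  | nil => simp [PySem.Chars.join_nil]
  | cons a l ih =>
    simp only [List.foldl_cons, List.map_cons]
    rw [ih, pv_char, pv_join_cons, List.append_assoc]

-- ===== VERDICT (by name: the statement is the Claim_ definition above) =====
theorem amino_acid_to_mrna_spec : Claim_equal_amino_acid_to_mrna := by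
  intro s _
  unfold Spec_amino_acid_to_mrna amino_acid_to_mrna amino_acid_to_mrna_alt
  rw [pv_fold_eq]
  simp
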